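-- pv_equiv track=rewrite | github.com/jwerthen/Werco-ERP-MES | backend/scripts/import_job_list.py | _apply_wo_suffixes
-- ===== SOURCE A (Python) =====
-- from collections import defaultdict
--
-- def _apply_wo_suffixes(rows):
--     """When the same WERCO JOB # appears on >1 row, suffix -1, -2, ... in
--     spreadsheet order so the resulting WO numbers are unique per company."""
--     counts = defaultdict(int)
--     for r in rows:
--         counts[r["wo_number"]] += 1
--
--     seen = defaultdict(int)
--     for r in rows:
--         wo = r["wo_number"]
--         if counts[wo] > 1:
--             seen[wo] += 1
--             r["final_wo_number"] = f"{wo}-{seen[wo]}"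
--         else:
--             r["final_wo_number"] = wo
--     return rows
-- ===== SOURCE B (Python) =====
-- from collections import defaultdict
--
-- def _apply_wo_suffixes(rows):
--     """Group rows by wo_number once, then walk each bucket: singletons keep
--     their number, larger buckets get -1, -2, ... in spreadsheet order."""
--     groups = defaultdict(list)
--     for r in rows:
--         groups[r["wo_number"]].append(r)
--     for wo, bucket in groups.items():
--         if len(bucket) == 1:
--             bucket[0]["final_wo_number"] = wo
--         else:
--             for i, r in enumerate(bucket, 1):
--                 r["final_wo_number"] = f"{wo}-{i}"
--     return rows
-- ===== Notes on version B (the rewrite author's own statement) =====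
-- stated objective: alternative
-- what changed: Replaces the count-pass-then-rescan (two passes over rows with a running 'seen' counter) by group-then-walk: one pass builds wo_number -> bucket of rows, then each bucket is enumerated on its own to assign suffixes.
import Mathlib
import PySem

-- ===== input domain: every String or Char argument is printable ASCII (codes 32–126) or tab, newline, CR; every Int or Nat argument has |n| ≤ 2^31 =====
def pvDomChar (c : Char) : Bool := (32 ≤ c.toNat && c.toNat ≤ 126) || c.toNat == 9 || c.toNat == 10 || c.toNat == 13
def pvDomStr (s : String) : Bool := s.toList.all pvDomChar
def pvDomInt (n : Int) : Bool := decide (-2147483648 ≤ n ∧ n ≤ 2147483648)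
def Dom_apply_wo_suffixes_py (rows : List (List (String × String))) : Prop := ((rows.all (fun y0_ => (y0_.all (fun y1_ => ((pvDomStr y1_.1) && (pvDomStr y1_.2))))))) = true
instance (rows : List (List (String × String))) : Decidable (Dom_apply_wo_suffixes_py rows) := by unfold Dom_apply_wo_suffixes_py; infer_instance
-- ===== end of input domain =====

-- B replaces A's count-pass-then-rescan by group-then-walk-each-bucket (an alternative
-- decomposition, same cost). A mutates the row dicts in place; the equivalence proved
-- here is about the returned list of (updated) rows.


-- ===== PORT A =====
-- Python reads r["wo_number"] (KeyError if absent — excluded by Pre_, so the getD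
-- default "" is never read on admitted inputs); r["final_wo_number"] = v is Dict.insert.
def apply_wo_suffixes_py (rows : List (List (String × String))) : List (List (String × String)) :=
  let counts : PySem.Dict String Int :=
    rows.foldl (fun d r => d.modify ((PySem.Dict.mk r).getD "wo_number" "") 0 (· + 1))
      PySem.Dict.empty
  (rows.foldl
    (fun (st : List (List (String × String)) × PySem.Dict String Int) r =>
      let wo := (PySem.Dict.mk r).getD "wo_number" ""
      if counts.getD wo 0 > 1 then
        let seen := st.2.modify wo 0 (· + 1)
        (st.1 ++ [((PySem.Dict.mk r).insert "final_wo_number"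
            (wo ++ "-" ++ PySem.Int.toStr (seen.getD wo 0))).items], seen)
      else
        (st.1 ++ [((PySem.Dict.mk r).insert "final_wo_number" wo).items], st.2))
    ([], PySem.Dict.empty)).1

-- ===== PORT B =====
-- Source B appends the row OBJECTS to buckets and mutates them; the functional rendering
-- buckets each row's INDEX (enumerate) and collects the bucket walks' assignments in
-- finals : index → final_wo_number, applied to the rows at the end.
def apply_wo_suffixes_py_alt (rows : List (List (String × String))) : List (List (String × String)) :=
  let groups : PySem.Dict String (List Int) :=
    (PySem.List.enumerate rows 0).foldl
      (fun d p => d.modify ((PySem.Dict.mk p.2).getD "wo_number" "") [] (· ++ [p.1]))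
      PySem.Dict.empty
  let finals : PySem.Dict Int String :=
    groups.items.foldl
      (fun f g =>
        if g.2.length == 1 then f.insert (g.2.headD 0) g.1
        else (PySem.List.enumerate g.2 1).foldl
          (fun f p => f.insert p.2 (g.1 ++ "-" ++ PySem.Int.toStr p.1)) f)
      PySem.Dict.empty
  (PySem.List.enumerate rows 0).map
    (fun p => ((PySem.Dict.mk p.2).insert "final_wo_number" (finals.getD p.1 "")).items)

-- ===== PRECONDITION & SPEC =====
-- Pre_: every row carries the key "wo_number"; on any other input Python A raises
-- KeyError (returns no value), as does B.
def Pre_apply_wo_suffixes_py (rows : List (List (String × String))) : Prop :=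
  ∀ r ∈ rows, "wo_number" ∈ r.map (·.1)
instance (rows : List (List (String × String))) : Decidable (Pre_apply_wo_suffixes_py rows) := by
  unfold Pre_apply_wo_suffixes_py; infer_instance

def pvWitness_apply_wo_suffixes_py : (List (List (String × String))) :=
  [[("wo_number", "J7"), ("qty", "2")], [("wo_number", "J7")], [("wo_number", "K1")]]

def Spec_apply_wo_suffixes_py (rows : List (List (String × String))) (out : List (List (String × String))) : Prop := out = apply_wo_suffixes_py_alt rows
instance (rows : List (List (String × String))) (out : List (List (String × String))) : Decidable (Spec_apply_wo_suffixes_py rows out) := by unfold Spec_apply_wo_suffixes_py; infer_instance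

-- ===== CLAIM (what is proved, stated in full; the proofs are below) =====
def Claim_equal_apply_wo_suffixes_py : Prop := ∀ (rows : List (List (String × String))), Dom_apply_wo_suffixes_py rows → Pre_apply_wo_suffixes_py rows → Spec_apply_wo_suffixes_py rows (apply_wo_suffixes_py rows)

-- ===== LEMMAS AND PROOFS =====

-- r["wo_number"] as both ports read it
def pvWo (r : List (String × String)) : String := (PySem.Dict.mk r).getD "wo_number" ""
-- the updated row both ports emit
def pvOut (r : List (String × String)) (w : String) : List (String × String) :=
  ((PySem.Dict.mk r).insert "final_wo_number" w).items
-- the final number of the row at position i whose wo_number is w (ws = all wo_numbers)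
def pvFinal (ws : List String) (i : Nat) (w : String) : String :=
  if ws.count w > 1 then w ++ "-" ++ PySem.Int.toStr (((ws.take i).count w : Int) + 1) else w
-- the common reference output, rows rendered from position i on
def pvSpec (ws : List String) : Nat → List (List (String × String)) → List (List (String × String))
  | _, [] => []
  | i, r :: l => pvOut r (pvFinal ws i (pvWo r)) :: pvSpec ws (i + 1) l

theorem pvSpec_length (ws : List String) (i : Nat) (l : List (List (String × String))) :
    (pvSpec ws i l).length = l.length := by
  induction l generalizing i with
  | nil => rfl
  | cons r t ih => simp [pvSpec, ih]

theorem pvSpec_getElem (ws : List String) (s : Nat) (l : List (List (String × String)))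
    (k : Nat) (hk : k < l.length) :
    (pvSpec ws s l)[k]'(by rw [pvSpec_length]; exact hk)
      = pvOut l[k] (pvFinal ws (s + k) (pvWo l[k])) := by
  induction l generalizing s k with
  | nil => exact absurd hk (by simp)
  | cons r t ih =>
    cases k with
    | zero => simp [pvSpec]
    | succ k =>
      simp only [pvSpec, List.getElem_cons_succ]
      rw [ih (s + 1) k (by simpa using hk)]
      ring_nf

-- ===== A-side =====

theorem foldA (counts : PySem.Dict String Int) (ws : List String)
    (hc : ∀ w, counts.getD w 0 = ws.count w) :
    ∀ (l : List (List (String × String))) (pre : List String)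
      (acc : List (List (String × String))) (seen : PySem.Dict String Int),
      ws = pre ++ l.map pvWo →
      (∀ w, ws.count w > 1 → seen.getD w 0 = pre.count w) →
      (l.foldl
        (fun (st : List (List (String × String)) × PySem.Dict String Int) r =>
          let wo := pvWo r
          if counts.getD wo 0 > 1 then
            let seen := st.2.modify wo 0 (· + 1)
            (st.1 ++ [pvOut r (wo ++ "-" ++ PySem.Int.toStr (seen.getD wo 0))], seen)
          else (st.1 ++ [pvOut r wo], st.2))
        (acc, seen)).1 = acc ++ pvSpec ws pre.length l := by
  intro l
  induction l with
  | nil => intro pre acc seen _ _; simp [pvSpec]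
  | cons r t ih =>
    intro pre acc seen hws hseen
    simp only [List.foldl_cons]
    have htake : ws.take pre.length = pre := by rw [hws, List.take_left]
    have hcount : ∀ v, (ws.take pre.length).count v = pre.count v := by rw [htake]; intro v; rfl
    by_cases h : counts.getD (pvWo r) 0 > 1
    · rw [if_pos h]
      have hcnt : ws.count (pvWo r) > 1 := by rw [hc] at h; exact_mod_cast h
      have hs : (seen.modify (pvWo r) 0 (· + 1)).getD (pvWo r) 0 = pre.count (pvWo r) + 1 := by
        rw [PySem.Dict.getD_modify_self, hseen _ hcnt]
      rw [ih (pre ++ [pvWo r]) _ _ (by simpa [List.append_assoc] using hws) ?_]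
      · simp only [List.length_append, List.length_cons, List.length_nil, pvSpec, pvFinal,
          if_pos hcnt, hs, hcount]
        simp
      · intro v hv
        by_cases hvw : v = pvWo r
        · subst hvw
          rw [PySem.Dict.getD_modify_self, hseen _ hv]
          simp
        · rw [PySem.Dict.getD_modify_of_ne _ 0 _ hvw, hseen _ hv]
          simp [Ne.symm hvw]
    · rw [if_neg h]
      have hcnt : ¬ ws.count (pvWo r) > 1 := by rw [hc] at h; exact_mod_cast h
      rw [ih (pre ++ [pvWo r]) _ _ (by simpa [List.append_assoc] using hws) ?_]
      · simp only [List.length_append, List.length_cons, List.length_nil, pvSpec, pvFinal,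
          if_neg hcnt]
        simp
      · intro v hv
        have hvw : v ≠ pvWo r := by rintro rfl; exact hcnt hv
        rw [hseen _ hv]
        simp [Ne.symm hvw]
theorem A_eq (rows : List (List (String × String))) :
    apply_wo_suffixes_py rows = pvSpec (rows.map pvWo) 0 rows := by
  have hc : ∀ w, (rows.foldl (fun d r => d.modify (pvWo r) 0 (· + 1)) PySem.Dict.empty).getD w 0
      = ((rows.map pvWo).count w : Int) := by
    intro w
    rw [show rows.foldl (fun d r => PySem.Dict.modify d (pvWo r) 0 (· + 1))
          (PySem.Dict.empty : PySem.Dict String Int)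
        = (rows.map pvWo).foldl (fun d x => PySem.Dict.modify d x 0 (· + 1)) PySem.Dict.empty
      from (@List.foldl_map (List (String × String)) String (PySem.Dict String Int) pvWo
        (fun d x => PySem.Dict.modify d x 0 (· + 1)) rows PySem.Dict.empty).symm,
      PySem.Dict.getD_foldl_modify_add_one]
    simp
  have h := foldA _ (rows.map pvWo) hc rows [] [] PySem.Dict.empty rfl
    (by intro w _; simp [PySem.Dict.getD_empty])
  simpa only [List.nil_append] using h

-- ===== B-side =====

-- the (increasing) list of indices s, s+1, … of rows whose wo_number is w
def pvIdx (w : String) : Int → List (List (String × String)) → List Int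
  | _, [] => []
  | s, r :: l => if pvWo r = w then s :: pvIdx w (s + 1) l else pvIdx w (s + 1) l

theorem pvIdx_length (w : String) (s : Int) (l : List (List (String × String))) :
    (pvIdx w s l).length = (l.map pvWo).count w := by
  induction l generalizing s with
  | nil => rfl
  | cons r t ih =>
    by_cases h : pvWo r = w
    · simp [pvIdx, h, ih]
    · simp [pvIdx, h, ih]

theorem pvIdx_mem (w : String) (s : Int) (l : List (List (String × String))) (j : Int) :
    j ∈ pvIdx w s l ↔ ∃ (k : Nat), ∃ (hk : k < l.length), j = s + k ∧ pvWo l[k] = w := by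
  induction l generalizing s with
  | nil => simp [pvIdx]
  | cons r t ih =>
    constructor
    · intro hj
      by_cases h : pvWo r = w
      · rw [pvIdx, if_pos h] at hj
        rcases List.mem_cons.mp hj with rfl | hj
        · exact ⟨0, by simp, by simp, by simpa using h⟩
        · obtain ⟨k, hk, hjk, hw⟩ := (ih (s + 1)).mp hj
          exact ⟨k + 1, by simpa using hk, by omega, by simpa using hw⟩
      · rw [pvIdx, if_neg h] at hj
        obtain ⟨k, hk, hjk, hw⟩ := (ih (s + 1)).mp hj
        exact ⟨k + 1, by simpa using hk, by omega, by simpa using hw⟩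
    · rintro ⟨k, hk, rfl, hw⟩
      cases k with
      | zero =>
        simp only [List.getElem_cons_zero] at hw
        rw [pvIdx, if_pos hw]; simp
      | succ k =>
        have : s + (k + 1 : Nat) = (s + 1) + k := by push_cast; omega
        have hm : ((s + (k + 1 : Nat) : Int)) ∈ pvIdx w (s + 1) t := by
          rw [ih]; exact ⟨k, by simpa using hk, by push_cast; omega, by simpa using hw⟩
        by_cases h : pvWo r = w
        · rw [pvIdx, if_pos h]; exact List.mem_cons_of_mem _ hm
        · rw [pvIdx, if_neg h]; exact hm

theorem pvIdx_ge (w : String) (s : Int) (l : List (List (String × String))) :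
    ∀ j ∈ pvIdx w s l, s ≤ j := by
  intro j hj
  obtain ⟨k, hk, rfl, -⟩ := (pvIdx_mem w s l j).mp hj
  omega

theorem pvIdx_nodup (w : String) (s : Int) (l : List (List (String × String))) :
    (pvIdx w s l).Nodup := by
  induction l generalizing s with
  | nil => simp [pvIdx]
  | cons r t ih =>
    by_cases h : pvWo r = w
    · rw [pvIdx, if_pos h]
      refine List.nodup_cons.mpr ⟨fun hm => ?_, ih (s + 1)⟩
      have := pvIdx_ge w (s + 1) t s hm
      omega
    · rw [pvIdx, if_neg h]; exact ih (s + 1)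

theorem pvIdx_idxOf (w : String) (s : Int) (l : List (List (String × String)))
    (i : Nat) (hi : i < l.length) (hw : pvWo l[i] = w) :
    (pvIdx w s l).idxOf (s + i) = ((l.take i).map pvWo).count w := by
  induction l generalizing s i with
  | nil => simp at hi
  | cons r t ih =>
    cases i with
    | zero =>
      simp only [List.getElem_cons_zero] at hw
      rw [pvIdx, if_pos hw]
      simp
    | succ i =>
      simp only [List.getElem_cons_succ] at hw
      have hi' : i < t.length := by simpa using hi
      have harg : s + (i + 1 : Nat) = (s + 1) + i := by push_cast; omega
      by_cases h : pvWo r = w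
      · rw [pvIdx, if_pos h]
        have hne : s ≠ s + ((i + 1 : Nat) : Int) := by push_cast; omega
        rw [List.idxOf_cons_ne _ (by exact_mod_cast hne), harg, ih (s + 1) i hi' hw]
        simp [h]
      · rw [pvIdx, if_neg h, harg, ih (s + 1) i hi' hw]
        simp [h]

theorem groups_getD (w : String) :
    ∀ (l : List (List (String × String))) (s : Int) (d : PySem.Dict String (List Int)),
      ((PySem.List.enumerate l s).foldl (fun d p => d.modify (pvWo p.2) [] (· ++ [p.1])) d).getD w []
        = d.getD w [] ++ pvIdx w s l := by
  intro l
  induction l with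
  | nil => intro s d; simp [PySem.List.enumerate_nil, pvIdx]
  | cons r t ih =>
    intro s d
    rw [PySem.List.enumerate_cons, List.foldl_cons, ih]
    by_cases h : pvWo r = w
    · rw [pvIdx, if_pos h, h, PySem.Dict.getD_modify_self]
      simp
    · rw [pvIdx, if_neg h, PySem.Dict.getD_modify_of_ne _ _ _ (Ne.symm h)]

theorem items_eq_keys_map {κ ν : Type} [BEq κ] [LawfulBEq κ] (d : PySem.Dict κ ν) (d0 : ν)
    (h : d.keys.Nodup) : d.items = d.keys.map (fun k => (k, d.getD k d0)) := by
  have : d.keys.map (fun k => (k, d.getD k d0)) = d.items.map (fun p => (p.1, d.getD p.1 d0)) := by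
    simp [PySem.Dict.keys, List.map_map, Function.comp]
  rw [this]
  conv_lhs => rw [← List.map_id d.items]
  refine (List.map_congr_left ?_).symm
  intro p hp
  have := PySem.Dict.getD_of_mem_items (k := p.1) (v := p.2) (d := d) (d0 := d0) (by simpa using hp) h
  simp [this]

def pvStepG (f : PySem.Dict Int String) (g : String × List Int) : PySem.Dict Int String :=
  if g.2.length == 1 then f.insert (g.2.headD 0) g.1
  else (PySem.List.enumerate g.2 1).foldl
    (fun f p => f.insert p.2 (g.1 ++ "-" ++ PySem.Int.toStr p.1)) f

def pvBucketVal (w : String) (b : List Int) (i : Int) : String :=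
  if b.length = 1 then w else w ++ "-" ++ PySem.Int.toStr (1 + (b.idxOf i : Int))

theorem insertFold_getD (w : String) :
    ∀ (b : List Int) (s : Int) (f : PySem.Dict Int String) (i : Int), b.Nodup →
      (((PySem.List.enumerate b s).foldl
          (fun f p => f.insert p.2 (w ++ "-" ++ PySem.Int.toStr p.1)) f).getD i "")
        = if i ∈ b then w ++ "-" ++ PySem.Int.toStr (s + (b.idxOf i : Int)) else f.getD i "" := by
  intro b
  induction b with
  | nil => intro s f i _; simp [PySem.List.enumerate_nil]
  | cons j t ih =>
    intro s f i hnd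
    rw [PySem.List.enumerate_cons, List.foldl_cons, ih _ _ _ hnd.of_cons]
    by_cases hit : i ∈ t
    · have hij : i ≠ j := fun e => (List.nodup_cons.mp hnd).1 (e ▸ hit)
      rw [if_pos hit, if_pos (List.mem_cons_of_mem _ hit), List.idxOf_cons_ne _ (Ne.symm hij)]
      push_cast; ring_nf
    · rw [if_neg hit]
      by_cases hij : i = j
      · subst hij
        simp
      · simp [PySem.Dict.getD_insert, hij, hit]

theorem pvStepG_getD (f : PySem.Dict Int String) (w : String) (b : List Int) (i : Int)
    (hnd : b.Nodup) :
    (pvStepG f (w, b)).getD i "" = if i ∈ b then pvBucketVal w b i else f.getD i "" := by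
  unfold pvStepG pvBucketVal
  by_cases h1 : b.length = 1
  · obtain ⟨j, rfl⟩ := List.length_eq_one_iff.mp h1
    simp only [if_pos (by simp : (([j] : List Int).length == 1) = true)]
    by_cases hij : i = j
    · subst hij
      simp
    · simp [PySem.Dict.getD_insert, hij]
  · rw [if_neg (by simpa using h1), insertFold_getD w b 1 f i hnd]
    by_cases hib : i ∈ b
    · rw [if_pos hib, if_pos hib, if_neg h1]
    · rw [if_neg hib, if_neg hib]

theorem foldG_skip (i : Int) :
    ∀ (gs : List (String × List Int)) (f : PySem.Dict Int String),
      (∀ g ∈ gs, i ∉ g.2 ∧ g.2.Nodup) →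
      (gs.foldl pvStepG f).getD i "" = f.getD i "" := by
  intro gs
  induction gs with
  | nil => intro f _; rfl
  | cons g t ih =>
    intro f h
    rw [List.foldl_cons, ih _ (fun g hg => h g (List.mem_cons_of_mem _ hg))]
    obtain ⟨hni, hnd⟩ := h g List.mem_cons_self
    rw [show g = (g.1, g.2) from rfl, pvStepG_getD _ _ _ _ hnd, if_neg hni]

theorem foldG_hit (i : Int) (w : String) (b : List Int)
    (gs1 gs2 : List (String × List Int)) (f : PySem.Dict Int String)
    (hb : b.Nodup) (hib : i ∈ b)
    (h2 : ∀ g ∈ gs2, i ∉ g.2 ∧ g.2.Nodup) :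
    ((gs1 ++ (w, b) :: gs2).foldl pvStepG f).getD i "" = pvBucketVal w b i := by
  rw [List.foldl_append, List.foldl_cons, foldG_skip i gs2 _ h2,
    pvStepG_getD _ _ _ _ hb, if_pos hib]

theorem finals_getD (rows : List (List (String × String))) (i : Nat) (hi : i < rows.length) :
    ((((PySem.List.enumerate rows 0).foldl
          (fun d p => d.modify (pvWo p.2) [] (· ++ [p.1]))
          PySem.Dict.empty).items.foldl pvStepG PySem.Dict.empty).getD (i : Int) "")
      = pvFinal (rows.map pvWo) i (pvWo rows[i]) := by
  set groups := (PySem.List.enumerate rows 0).foldl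
      (fun d p => d.modify (pvWo p.2) [] (· ++ [p.1])) PySem.Dict.empty with hgroups
  have hgd : ∀ v, groups.getD v [] = pvIdx v 0 rows := by
    intro v; rw [hgroups, groups_getD]; simp
  have hmem : (i : Int) ∈ pvIdx (pvWo rows[i]) 0 rows := by
    rw [pvIdx_mem]; exact ⟨i, hi, by omega, rfl⟩
  have hnd : groups.keys.Nodup := by
    rw [hgroups]
    exact PySem.Dict.nodup_keys_foldl_modify_key _ _ _ _ _ PySem.Dict.nodup_keys_empty
  have hk : pvWo rows[i] ∈ groups.keys := by
    by_contra hnk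
    have hc : groups.contains (pvWo rows[i]) = false := by
      rcases Bool.eq_false_or_eq_true (groups.contains (pvWo rows[i])) with h | h
      · exact absurd ((PySem.Dict.contains_iff_mem_keys _ _).mp h) hnk
      · exact h
    have hdd := PySem.Dict.getD_of_not_contains (d := groups) (k := pvWo rows[i])
      (d0 := ([] : List Int)) hc
    rw [hgd] at hdd
    rw [hdd] at hmem
    simp at hmem
  obtain ⟨K1, K2, hsplit⟩ := List.append_of_mem hk
  have hnd' : (K1 ++ pvWo rows[i] :: K2).Nodup := hsplit ▸ hnd
  have hw2 : pvWo rows[i] ∉ K2 :=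
    fun h => (List.nodup_cons.mp (List.nodup_append.mp hnd').2.1).1 h
  have hitems : groups.items
      = (K1 ++ pvWo rows[i] :: K2).map (fun v => (v, pvIdx v 0 rows)) := by
    rw [items_eq_keys_map groups ([] : List Int) hnd, hsplit]
    exact List.map_congr_left (fun v _ => by rw [hgd])
  rw [hitems, List.map_append, List.map_cons,
    foldG_hit (i : Int) _ _ _ _ _ (pvIdx_nodup _ _ _) hmem ?_]
  · have hlen : (pvIdx (pvWo rows[i]) 0 rows).length = (rows.map pvWo).count (pvWo rows[i]) :=
      pvIdx_length _ _ _
    have hpos : 0 < (pvIdx (pvWo rows[i]) 0 rows).length := List.length_pos_of_mem hmem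
    unfold pvBucketVal pvFinal
    by_cases h1 : (pvIdx (pvWo rows[i]) 0 rows).length = 1
    · rw [if_pos h1, if_neg (by omega)]
    · have hgt : (rows.map pvWo).count (pvWo rows[i]) > 1 := by omega
      rw [if_neg h1, if_pos hgt]
      have hidx := pvIdx_idxOf (pvWo rows[i]) 0 rows i hi rfl
      rw [show ((0 : Int) + (i : Nat)) = (i : Int) by omega] at hidx
      rw [hidx, ← List.map_take]
      ring_nf
  · rintro g hg
    obtain ⟨v, hv, rfl⟩ := List.mem_map.mp hg
    refine ⟨fun hmem' => ?_, pvIdx_nodup _ _ _⟩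
    obtain ⟨k, hk', hjk, hwk⟩ := (pvIdx_mem _ _ _ _).mp hmem'
    have : k = i := by omega
    subst this
    subst hwk
    exact hw2 hv

theorem pvSpec_eq_map_enumerate (rows : List (List (String × String)))
    (F : Int → String)
    (hF : ∀ (k : Nat) (hk : k < rows.length),
      F (k : Int) = pvFinal (rows.map pvWo) k (pvWo (rows[k]'hk))) :
    (PySem.List.enumerate rows 0).map (fun p => pvOut p.2 (F p.1))
      = pvSpec (rows.map pvWo) 0 rows := by
  apply List.ext_getElem
  · simp [pvSpec_length, PySem.List.length_enumerate]
  · intro k h1 h2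
    have h3 : k < rows.length := by simpa [PySem.List.length_enumerate] using h1
    rw [List.getElem_map, PySem.List.getElem_enumerate,
      pvSpec_getElem _ _ _ k (by simpa [pvSpec_length] using h2)]
    simp only [zero_add]
    rw [hF k h3]

theorem B_eq (rows : List (List (String × String))) :
    apply_wo_suffixes_py_alt rows = pvSpec (rows.map pvWo) 0 rows := by
  refine Eq.trans ?_ (pvSpec_eq_map_enumerate rows
    (fun j => ((((PySem.List.enumerate rows 0).foldl
        (fun d p => d.modify (pvWo p.2) [] (· ++ [p.1]))
        PySem.Dict.empty).items.foldl pvStepG PySem.Dict.empty).getD j ""))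
    (fun k hk => finals_getD rows k hk))
  rfl

-- ===== VERDICT (by name: the statement is the Claim_ definition above) =====
theorem apply_wo_suffixes_py_spec : Claim_equal_apply_wo_suffixes_py := by
  intro rows _ _
  unfold Spec_apply_wo_suffixes_py
  rw [A_eq, B_eq]
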